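-- pv_equiv track=rewrite | github.com/pypi-data/pypi-mirror-9 | packages/SamSifter/SamSifter-0.5.1.tar.gz/SamSifter-0.5.1/samsifter/util/papertrail.py | find_last_in_chain
-- ===== SOURCE A (Python) =====
-- def find_last_in_chain(current_id, pg_entries):
--     """Recursively identify the last program entry in the chain.
--
--     @PG entries in SAM file headers can be chained by linking each entry to the
--     previously applied program using the optional PP tag. The actual last entry
--     of the chain can only be found under the assumption that all programs are
--     listed within one chain.
--
--     Note
--     ----
--     May lead to wrong assumptions about the actual order of programs applied to
--     dataset if the chain of PG entries is interrupted by missing PP tags. Use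
--     at own risk!
--
--     Parameters
--     ----------
--     current_id : str
--         Unique ID of program entry that serves as arbitrary start point for the
--         recursive search of the chain end.
--     pg_entries : dict of dicts
--         Dictionary of @PG record tags (key:value) referenced by their unique
--         program ID.
--
--     Returns
--     -------
--     str
--         Unique ID of the assumed last entry in the program chain (see note
--         above!)
--     """
--     for entry, tags in pg_entries.items():
--         try:
--             if current_id == tags['PP']:
--                 # another entry follows
--                 return find_last_in_chain(entry, pg_entries)
--         except KeyError:
--             # entry has no PP tag
--             continue
--     # no other entry follows
--     return current_id
-- ===== SOURCE B (Python) =====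
-- def find_last_in_chain(current_id, pg_entries):
--     """Iteratively follow the PG chain: rescan the entries until no entry
--     links back to the current id via its PP tag."""
--     while True:
--         for entry, tags in pg_entries.items():
--             if 'PP' in tags and tags['PP'] == current_id:
--                 current_id = entry
--                 break
--         else:
--             return current_id
-- ===== Notes on version B (the rewrite author's own statement) =====
-- stated objective: idiomatic
-- what changed: The tail-recursive chain walk is rewritten as an iterative while-loop with a for/else inner scan that updates current_id in place; the linear first-match scan itself is unchanged.
import Mathlib
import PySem

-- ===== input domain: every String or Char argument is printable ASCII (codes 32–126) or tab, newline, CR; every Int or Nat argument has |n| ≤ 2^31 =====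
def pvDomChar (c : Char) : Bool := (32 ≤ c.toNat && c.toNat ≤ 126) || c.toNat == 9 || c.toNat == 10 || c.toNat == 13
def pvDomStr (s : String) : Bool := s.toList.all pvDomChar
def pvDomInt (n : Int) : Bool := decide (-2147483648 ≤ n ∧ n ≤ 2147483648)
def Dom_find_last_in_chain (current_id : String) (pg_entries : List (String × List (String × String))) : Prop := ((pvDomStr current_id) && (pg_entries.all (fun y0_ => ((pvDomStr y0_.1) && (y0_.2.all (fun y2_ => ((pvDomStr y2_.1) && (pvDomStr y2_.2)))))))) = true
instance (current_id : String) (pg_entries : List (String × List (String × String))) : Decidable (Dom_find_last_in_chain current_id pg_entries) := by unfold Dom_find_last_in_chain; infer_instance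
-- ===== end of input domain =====

-- ===== PORT A =====
-- B changes only the decomposition (recursion -> iteration); the linear first-match scan is the same.
-- tags['PP'] with KeyError-continue = first-match lookup in the association list (exact for dicts).
-- The recursion is guarded by fuel = pg_entries.length + 1, which suffices whenever the Python
-- recursion terminates (each followed link lands on an entry key, and a repeat would loop forever).
def pvLookupPP : List (String × String) → Option String
  | [] => none
  | (k, v) :: rest => if k == "PP" then some v else pvLookupPP rest

-- the 'for entry, tags in pg_entries.items()' scan, returning the recursive call on a match
def pvFindAGo (pg_entries : List (String × List (String × String))) :
    Nat → String → List (String × List (String × String)) → String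
  | _, current_id, [] => current_id
  | fuel, current_id, (entry, tags) :: rest =>
    match pvLookupPP tags with
    | some pp =>
      if current_id == pp then
        match fuel with
        | 0 => current_id                    -- fuel guard (never reached under Pre_)
        | Nat.succ f => pvFindAGo pg_entries f entry pg_entries
      else pvFindAGo pg_entries fuel current_id rest
    | none => pvFindAGo pg_entries fuel current_id rest

def find_last_in_chain (current_id : String) (pg_entries : List (String × List (String × String))) : String :=
  pvFindAGo pg_entries (pg_entries.length + 1) current_id pg_entries

-- ===== PORT B =====
-- Source B's inner for/else scan: the first entry whose PP tag equals cur, if any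
def pvNextLink (cur : String) : List (String × List (String × String)) → Option String
  | [] => none
  | (entry, tags) :: rest =>
    if tags.lookup "PP" == some cur then some entry else pvNextLink cur rest

-- Source B's 'while True' loop, fuel-guarded (fuel 0 never reached under Pre_)
def pvLoopB (pg_entries : List (String × List (String × String))) : Nat → String → String
  | 0, cur => cur
  | Nat.succ f, cur =>
    match pvNextLink cur pg_entries with
    | none => cur
    | some entry => pvLoopB pg_entries f entry

def find_last_in_chain_alt (current_id : String) (pg_entries : List (String × List (String × String))) : String :=
  pvLoopB pg_entries (pg_entries.length + 1) current_id

-- ===== PRECONDITION & SPEC =====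
-- step map of the PP-link chain (first entry whose PP tag equals cur), for Pre_ only
def pvChainStep (pg_entries : List (String × List (String × String))) (cur : String) : Option String :=
  pg_entries.find? (fun e => e.2.lookup "PP" == some cur) |>.map (·.1)

def pvChainStops (pg_entries : List (String × List (String × String))) : Nat → String → Bool
  | 0, _ => false
  | Nat.succ f, cur =>
    match pvChainStep pg_entries cur with
    | none => true
    | some entry => pvChainStops pg_entries f entry

-- Pre_ excludes exactly the inputs whose PP-link chain from current_id never ends (a cycle):
-- there Python A raises RecursionError (and Python B loops forever). A chain that does end does so
-- within pg_entries.length + 1 steps, since every followed link is an entry key and the step map is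
-- deterministic, so a repeated id would mean a cycle.
def Pre_find_last_in_chain (current_id : String) (pg_entries : List (String × List (String × String))) : Prop :=
  pvChainStops pg_entries (pg_entries.length + 1) current_id = true
instance (current_id : String) (pg_entries : List (String × List (String × String))) : Decidable (Pre_find_last_in_chain current_id pg_entries) := by unfold Pre_find_last_in_chain; infer_instance

def pvWitness_find_last_in_chain : String × (List (String × List (String × String))) :=
  ("bwa", [("samtools", [("PN", "samtools"), ("PP", "bwa")]), ("filter", [("PP", "samtools")]), ("orphan", [])])

def Spec_find_last_in_chain (current_id : String) (pg_entries : List (String × List (String × String))) (out : String) : Prop := out = find_last_in_chain_alt current_id pg_entries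
instance (current_id : String) (pg_entries : List (String × List (String × String))) (out : String) : Decidable (Spec_find_last_in_chain current_id pg_entries out) := by unfold Spec_find_last_in_chain; infer_instance

-- ===== CLAIM (what is proved, stated in full; the proofs are below) =====
def Claim_equal_find_last_in_chain : Prop := ∀ (current_id : String) (pg_entries : List (String × List (String × String))), Dom_find_last_in_chain current_id pg_entries → Pre_find_last_in_chain current_id pg_entries → Spec_find_last_in_chain current_id pg_entries (find_last_in_chain current_id pg_entries)

-- ===== LEMMAS AND PROOFS =====

-- the two hand-written first-match lookups agree
theorem pvLookupPP_eq (tags : List (String × String)) : tags.lookup "PP" = pvLookupPP tags := by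
  induction tags with
  | nil => rfl
  | cons hd tl ih =>
    obtain ⟨k, v⟩ := hd
    by_cases h : k = "PP"
    · simp [List.lookup, pvLookupPP, h]
    · have h2 : ("PP" == k) = false := by simpa using fun e => h e.symm
      simp [List.lookup, pvLookupPP, h, h2, ih]

-- A's scan over the remaining entries, expressed through B's first-match helper
theorem pvFindAGo_eq_scan (pg_entries : List (String × List (String × String))) (fuel : Nat)
    (cur : String) (rest : List (String × List (String × String))) :
    pvFindAGo pg_entries fuel cur rest =
      match pvNextLink cur rest with
      | none => cur
      | some entry =>
        match fuel with
        | 0 => cur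
        | Nat.succ f => pvFindAGo pg_entries f entry pg_entries := by
  induction rest with
  | nil => rw [pvFindAGo.eq_def]; simp [pvNextLink]
  | cons hd tl ih =>
    obtain ⟨entry, tags⟩ := hd
    rw [pvFindAGo.eq_def]
    cases h : pvLookupPP tags with
    | none => simpa [pvNextLink, pvLookupPP_eq, h] using ih
    | some pp =>
      by_cases hc : cur == pp
      · have hpp : pp = cur := (beq_iff_eq.mp hc).symm
        subst hpp
        simp [pvNextLink, pvLookupPP_eq, h]
      · have h2 : ¬ (pp == cur) := fun e => hc (beq_iff_eq.mpr (beq_iff_eq.mp e).symm)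
        simpa [pvNextLink, pvLookupPP_eq, h, hc, h2] using ih

-- main induction on the fuel: A's recursion equals B's loop at the same fuel
theorem pvFindAGo_eq_loop (pg_entries : List (String × List (String × String))) (fuel : Nat)
    (cur : String) :
    pvFindAGo pg_entries fuel cur pg_entries = pvLoopB pg_entries fuel cur := by
  induction fuel generalizing cur with
  | zero =>
    rw [pvFindAGo_eq_scan]
    cases pvNextLink cur pg_entries <;> simp [pvLoopB]
  | succ f ih =>
    rw [pvFindAGo_eq_scan]
    cases h : pvNextLink cur pg_entries <;> simp [pvLoopB, h, ih]

-- ===== VERDICT (by name: the statement is the Claim_ definition above) =====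
theorem find_last_in_chain_spec : Claim_equal_find_last_in_chain := by
  intro current_id pg_entries _ _
  unfold Spec_find_last_in_chain find_last_in_chain find_last_in_chain_alt
  exact pvFindAGo_eq_loop pg_entries (pg_entries.length + 1) current_id
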